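-- pv_equiv track=rewrite | github.com/cedar-renjun/sort_algorithm_python | algorithm.py | sort_fun_0
-- ===== SOURCE A (Python) =====
-- def sort_fun_0(d):
--     n = len(d)
--
--     for i in range(0, n):
--         min_idx = i
--         min_raw = i
--         for j in range(i+1, n):
--             if d[j] < d[min_idx]:
--                 min_idx = j
--         if min_idx != min_raw:
--             d[min_raw],d[min_idx] = (d[min_idx], d[min_raw])
--
--     return d
-- ===== SOURCE B (Python) =====
-- def sort_fun_0(d):
--     # Note: unlike the original (which sorts d in place), this returns a new
--     # sorted list; the equivalence claimed is about the return value only.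
--     return sorted(d)
-- ===== Notes on version B (the rewrite author's own statement) =====
-- stated objective: faster
-- what changed: Replaces the hand-written O(n^2) selection sort (nested index loops with in-place swaps) by a single call to the built-in sorted() (Timsort); return value is identical since a sorted list of integers is determined by the multiset, but B returns a new list instead of mutating d in place.
import Mathlib
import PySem

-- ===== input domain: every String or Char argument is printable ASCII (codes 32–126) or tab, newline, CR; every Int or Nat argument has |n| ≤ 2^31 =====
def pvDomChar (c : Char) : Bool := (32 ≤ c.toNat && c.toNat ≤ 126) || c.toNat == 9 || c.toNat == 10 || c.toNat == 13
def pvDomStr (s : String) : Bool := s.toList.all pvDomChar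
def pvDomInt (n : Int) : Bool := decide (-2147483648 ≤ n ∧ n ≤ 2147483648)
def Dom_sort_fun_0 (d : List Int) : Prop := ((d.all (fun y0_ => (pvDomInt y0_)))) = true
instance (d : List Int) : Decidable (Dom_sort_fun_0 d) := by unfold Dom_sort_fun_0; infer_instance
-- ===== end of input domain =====

-- B replaces A's O(n^2) in-place selection sort by the built-in sorted() (returns a
-- new list instead of mutating d; the equivalence proved is about the return value).

-- ===== PORT A =====
-- one iteration of A's outer loop (index i), acting on the current list s; n is len(d)
def sortOuterBody (n : Int) (s : List Int) (i : Int) : List Int :=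
  let min_raw := i
  let min_idx := (PySem.List.pyRange (i+1) n).foldl
    (fun min_idx j =>
      if PySem.List.pyGetD s j 0 < PySem.List.pyGetD s min_idx 0 then j else min_idx)
    min_raw
  if min_idx ≠ min_raw then
    PySem.List.pySetD (PySem.List.pySetD s min_raw (PySem.List.pyGetD s min_idx 0))
      min_idx (PySem.List.pyGetD s min_raw 0)
  else s

def sort_fun_0 (d : List Int) : List Int :=
  let n : Int := d.length
  (PySem.List.pyRange 0 n).foldl (sortOuterBody n) d

-- ===== PORT B =====
def sort_fun_0_alt (d : List Int) : List Int :=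
  PySem.List.sorted d (fun x => x) false

-- ===== PRECONDITION & SPEC =====
def Spec_sort_fun_0 (d : List Int) (out : List Int) : Prop := out = sort_fun_0_alt d
instance (d : List Int) (out : List Int) : Decidable (Spec_sort_fun_0 d out) := by unfold Spec_sort_fun_0; infer_instance

-- ===== CLAIM (what is proved, stated in full; the proofs are below) =====
def Claim_equal_sort_fun_0 : Prop := ∀ (d : List Int), Dom_sort_fun_0 d → Spec_sort_fun_0 d (sort_fun_0 d)

-- ===== LEMMAS AND PROOFS =====

-- A's inner loop returns an index r with m ≤ r < n whose element is minimal among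
-- position m and positions [a, n).
theorem inner_min (s : List Int) :
    ∀ (t : Nat) (n a m : Int), 0 ≤ m → m < n → (n : Int) = s.length → m < a → (n - a).toNat = t →
    let r := (PySem.List.pyRange a n).foldl
      (fun mi j => if PySem.List.pyGetD s j 0 < PySem.List.pyGetD s mi 0 then j else mi) m
    m ≤ r ∧ r < n ∧ PySem.List.pyGetD s r 0 ≤ PySem.List.pyGetD s m 0 ∧
      (∀ j, a ≤ j → j < n → PySem.List.pyGetD s r 0 ≤ PySem.List.pyGetD s j 0) := by
  intro t
  induction t with
  | zero =>
    intro n a m hm hmn hn ha ht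
    rw [PySem.List.pyRange_one_eq_nil (by omega)]
    refine ⟨le_refl _, hmn, le_refl _, ?_⟩
    intro j hj1 hj2; omega
  | succ t ih =>
    intro n a m hm hmn hn ha ht
    have hab : a < n := by omega
    rw [PySem.List.pyRange_one_cons hab, List.foldl_cons]
    by_cases hlt : PySem.List.pyGetD s a 0 < PySem.List.pyGetD s m 0
    · simp only [if_pos hlt]
      obtain ⟨h1, h2, h3, h4⟩ := ih n (a+1) a (by omega) hab hn (by omega) (by omega)
      refine ⟨by omega, h2, le_trans h3 (le_of_lt hlt), ?_⟩
      intro j hj1 hj2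
      rcases eq_or_lt_of_le hj1 with h | h
      · rw [← h]; exact h3
      · exact h4 j (by omega) hj2
    · simp only [if_neg hlt]
      obtain ⟨h1, h2, h3, h4⟩ := ih n (a+1) m hm hmn hn (by omega) (by omega)
      refine ⟨h1, h2, h3, ?_⟩
      intro j hj1 hj2
      rcases eq_or_lt_of_le hj1 with h | h
      · rw [← h]; exact le_trans h3 (le_of_not_gt hlt)
      · exact h4 j (by omega) hj2

-- replacing the j-th element and re-consing the old one is a permutation
theorem replace_perm (xs : List Int) (x : Int) (j : Nat) (h : j < xs.length) :
    (xs[j] :: xs.set j x).Perm (x :: xs) := by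
  have h1 : (xs.set j x).Perm (x :: xs.eraseIdx j) := List.set_perm_cons_eraseIdx h x
  have h2 : xs.Perm (xs[j] :: xs.eraseIdx j) := (List.getElem_cons_eraseIdx_perm h).symm
  exact ((h1.cons _).trans ((List.Perm.swap _ _ _).trans ((h2.cons _).symm)))

theorem set_set_perm (s : List Int) (i k : Nat) (hi : i < s.length) (hk : k < s.length) :
    ((s.set i s[k]).set k s[i]).Perm s := by
  induction s generalizing i k with
  | nil => simp at hi
  | cons x xs ih =>
    match i, k with
    | 0, 0 => simp
    | 0, j+1 =>
      simp only [List.getElem_cons_succ, List.getElem_cons_zero, List.set_cons_zero,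
        List.set_cons_succ]
      exact replace_perm xs x j (by simpa using hk)
    | m+1, 0 =>
      simp only [List.getElem_cons_succ, List.getElem_cons_zero, List.set_cons_zero,
        List.set_cons_succ]
      exact replace_perm xs x m (by simpa using hi)
    | m+1, j+1 =>
      simp only [List.getElem_cons_succ, List.set_cons_succ]
      exact (ih m j (by simpa using hi) (by simpa using hk)).cons x

-- reading the swapped list
theorem getD_swap (s : List Int) (i k q : Int)
    (hi0 : 0 ≤ i) (hi : i < (s.length : Int)) (hk0 : 0 ≤ k) (hk : k < (s.length : Int))
    (hq0 : 0 ≤ q) (hq : q < (s.length : Int)) :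
    PySem.List.pyGetD (PySem.List.pySetD (PySem.List.pySetD s i (PySem.List.pyGetD s k 0))
        k (PySem.List.pyGetD s i 0)) q 0 =
      if q = k then PySem.List.pyGetD s i 0
      else if q = i then PySem.List.pyGetD s k 0
      else PySem.List.pyGetD s q 0 := by
  rw [PySem.List.pySetD_of_nonneg _ _ hi0, PySem.List.pySetD_of_nonneg _ _ hk0]
  rw [PySem.List.pyGetD_eq_getElem _ 0 hq0 (by simpa using hq)]
  rw [List.getElem_set, List.getElem_set]
  rw [PySem.List.pyGetD_eq_getElem s 0 hi0 hi, PySem.List.pyGetD_eq_getElem s 0 hk0 hk,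
      PySem.List.pyGetD_eq_getElem s 0 hq0 hq]
  split_ifs with h1 h2 h3 h4 h5 h6 <;> first
  | rfl
  | (exfalso; omega)

-- outer-loop invariant: the fold from index i keeps a permutation, and if the prefix
-- [0, i) is sorted and dominates the rest, the final list is fully sorted (as pyGetD facts)
theorem outer_inv :
    ∀ (t : Nat) (n i : Int) (s : List Int), 0 ≤ i → i ≤ n → (n : Int) = s.length →
    (n - i).toNat = t →
    (∀ p q : Int, 0 ≤ p → p < i → p ≤ q → q < n →
      PySem.List.pyGetD s p 0 ≤ PySem.List.pyGetD s q 0) →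
    ((PySem.List.pyRange i n).foldl (sortOuterBody n) s).Perm s ∧
    (∀ p q : Int, 0 ≤ p → p ≤ q → q < n →
      PySem.List.pyGetD ((PySem.List.pyRange i n).foldl (sortOuterBody n) s) p 0 ≤
      PySem.List.pyGetD ((PySem.List.pyRange i n).foldl (sortOuterBody n) s) q 0) := by
  intro t
  induction t with
  | zero =>
    intro n i s hi0 hin hn ht hP
    rw [PySem.List.pyRange_one_eq_nil (by omega)]
    refine ⟨List.Perm.refl s, ?_⟩
    intro p q hp0 hpq hq
    rcases eq_or_lt_of_le hpq with h | h
    · rw [h]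
    · exact hP p q hp0 (by omega) hpq hq
  | succ t ih =>
    intro n i s hi0 hin hn ht hP
    have hiltn : i < n := by omega
    rw [PySem.List.pyRange_one_cons hiltn, List.foldl_cons]
    -- analyse one outer-loop step
    obtain ⟨hk1, hk2, hk3, hk4⟩ := inner_min s ((n - (i+1)).toNat) n (i+1) i hi0 hiltn hn
      (by omega) rfl
    set k := (PySem.List.pyRange (i+1) n).foldl
      (fun mi j => if PySem.List.pyGetD s j 0 < PySem.List.pyGetD s mi 0 then j else mi) i
      with hkdef
    clear_value k
    -- minimality of s[k] over all of [i, n)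
    have hmin : ∀ j, i ≤ j → j < n → PySem.List.pyGetD s k 0 ≤ PySem.List.pyGetD s j 0 := by
      intro j hj1 hj2
      rcases eq_or_lt_of_le hj1 with h | h
      · rw [← h]; exact hk3
      · exact hk4 j (by omega) hj2
    have hs' : sortOuterBody n s i =
        if k ≠ i then
          PySem.List.pySetD (PySem.List.pySetD s i (PySem.List.pyGetD s k 0)) k
            (PySem.List.pyGetD s i 0)
        else s := by
      simp only [sortOuterBody, ← hkdef]
    have hgets' : ∀ q : Int, 0 ≤ q → q < n → PySem.List.pyGetD (sortOuterBody n s i) q 0 =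
        if k ≠ i ∧ q = k then PySem.List.pyGetD s i 0
        else if k ≠ i ∧ q = i then PySem.List.pyGetD s k 0
        else PySem.List.pyGetD s q 0 := by
      intro q hq0 hq
      rw [hs']
      by_cases hki : k ≠ i
      · rw [if_pos hki, getD_swap s i k q hi0 (by omega) (by omega) (by omega) hq0 (by omega)]
        by_cases hqk : q = k
        · rw [if_pos hqk, if_pos ⟨hki, hqk⟩]
        · by_cases hqi2 : q = i
          · rw [if_neg hqk, if_pos hqi2, if_neg (fun h => hqk h.2), if_pos ⟨hki, hqi2⟩]
          · rw [if_neg hqk, if_neg hqi2, if_neg (fun h => hqk h.2), if_neg (fun h => hqi2 h.2)]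
      · rw [if_neg hki]
        rw [if_neg (fun h => hki h.1), if_neg (fun h => hki h.1)]
    have hperm' : (sortOuterBody n s i).Perm s := by
      rw [hs']
      by_cases hki : k ≠ i
      · rw [if_pos hki, PySem.List.pySetD_of_nonneg _ _ hi0, PySem.List.pySetD_of_nonneg _ _ (by omega : (0:Int) ≤ k)]
        rw [PySem.List.pyGetD_eq_getElem s 0 hi0 (by omega), PySem.List.pyGetD_eq_getElem s 0 (by omega) (by omega : k < (s.length : Int))]
        exact set_set_perm s i.toNat k.toNat (by omega) (by omega)
      · rw [if_neg hki]
    have hlen' : (n : Int) = (sortOuterBody n s i).length := by rw [hperm'.length_eq]; exact hn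
    -- new prefix invariant at i+1
    have hP' : ∀ p q : Int, 0 ≤ p → p < i + 1 → p ≤ q → q < n →
        PySem.List.pyGetD (sortOuterBody n s i) p 0 ≤ PySem.List.pyGetD (sortOuterBody n s i) q 0 := by
      intro p q hp0 hp hpq hq
      rcases lt_or_ge q i with hqi | hqi
      · -- both p and q below i: values unchanged
        rw [hgets' p hp0 (by omega), hgets' q (by omega) hq]
        rw [if_neg (by omega), if_neg (by omega), if_neg (by omega), if_neg (by omega)]
        exact hP p q hp0 (by omega) hpq hq
      · -- q ≥ i: s'[q] is some old value s[j] with i ≤ j < n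
        have hj : ∃ j : Int, i ≤ j ∧ j < n ∧ PySem.List.pyGetD (sortOuterBody n s i) q 0 = PySem.List.pyGetD s j 0 := by
          rw [hgets' q (by omega) hq]
          by_cases hki : k ≠ i
          · by_cases hqk : q = k
            · exact ⟨i, le_refl _, hiltn, by rw [if_pos ⟨hki, hqk⟩]⟩
            · by_cases hqi' : q = i
              · exact ⟨k, by omega, hk2, by rw [if_neg (by tauto), if_pos ⟨hki, hqi'⟩]⟩
              · exact ⟨q, hqi, hq, by rw [if_neg (by tauto), if_neg (by tauto)]⟩
          · exact ⟨q, hqi, hq, by rw [if_neg (by tauto), if_neg (by tauto)]⟩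
        obtain ⟨j, hj1, hj2, hj3⟩ := hj
        rcases lt_or_ge p i with hpi | hpi
        · -- p < i: unchanged, dominated by old invariant
          rw [hgets' p hp0 (by omega), if_neg (by omega), if_neg (by omega), hj3]
          exact hP p j hp0 hpi (by omega) hj2
        · -- p = i: s'[i] = s[k] is the minimum of [i, n)
          have hpi' : p = i := by omega
          have : PySem.List.pyGetD (sortOuterBody n s i) p 0 = PySem.List.pyGetD s k 0 := by
            rw [hgets' p hp0 (by omega), hpi']
            by_cases hki : k ≠ i
            · rw [if_neg (by omega), if_pos ⟨hki, rfl⟩]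
            · have hki' : k = i := not_ne_iff.mp (by tauto)
              rw [if_neg (by tauto), if_neg (by tauto), hki']
          rw [this, hj3]
          exact hmin j hj1 hj2
    obtain ⟨hA, hB⟩ := ih n (i+1) (sortOuterBody n s i) (by omega) (by omega) hlen' (by omega) hP'
    exact ⟨hA.trans hperm', hB⟩

theorem sort_eq (d : List Int) : sort_fun_0 d = sort_fun_0_alt d := by
  obtain ⟨hperm, hsorted⟩ := outer_inv (d.length) (d.length) 0 d (le_refl _) (by omega) rfl
    (by omega) (by intro p q hp0 hp hpq hq; omega)
  set r := (PySem.List.pyRange 0 (d.length : Int)).foldl (sortOuterBody (d.length : Int)) d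
    with hrdef
  have hlen : r.length = d.length := hperm.length_eq
  have hpw : List.Pairwise (fun a b : Int => a ≤ b) r := by
    rw [List.pairwise_iff_getElem]
    intro a b ha hb hab
    have := hsorted (a : Int) (b : Int) (by omega) (by exact_mod_cast le_of_lt hab) (by omega)
    rwa [PySem.List.pyGetD_natCast, PySem.List.pyGetD_natCast,
      List.getD_eq_getElem r 0 ha, List.getD_eq_getElem r 0 hb] at this
  have := PySem.List.sorted_id_eq_of_perm_of_pairwise d r hperm hpw
  simpa [sort_fun_0, sort_fun_0_alt, ← hrdef] using this.symm

-- ===== VERDICT (by name: the statement is the Claim_ definition above) =====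
theorem sort_fun_0_spec : Claim_equal_sort_fun_0 := by
  intro d _
  unfold Spec_sort_fun_0
  exact sort_eq d
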